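-- pv_equiv track=rewrite | github.com/matheushexsel/sniper | main.py | _compute_candidate_slugs
-- ===== SOURCE A (Python) =====
-- from typing import Any, Dict, List, Optional, Tuple
--
-- def _bucket_start(ts: int, window_sec: int) -> int:
--     return (ts // window_sec) * window_sec
--
-- def _compute_candidate_slugs(asset: str, now_ts: int, window_sec: int, ahead: int, behind: int) -> List[str]:
--     """
--     For Polymarket crypto 15m markets, common slug patterns:
--       btc-updown-15m-<ts_rounded>
--     Generalize to:
--       {asset_lower}-updown-{window_minutes}m-<ts_rounded>
--
--     We generate candidates around current window to cover transitions.
--     """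
--     asset_l = asset.lower()
--     minutes = int(window_sec / 60)
--     base = _bucket_start(now_ts, window_sec)
--
--     # Try multiple timestamp anchors: start-of-window and end-of-window.
--     # Some markets use ts = window start; some could be end. We attempt both.
--     candidates: List[str] = []
--     for off in range(-behind, ahead + 1):
--         start_ts = base + off * window_sec
--         end_ts = start_ts  # first attempt: start as in the bot you provided
--         candidates.append(f"{asset_l}-updown-{minutes}m-{end_ts}")
--         # second attempt: end-of-window anchor
--         candidates.append(f"{asset_l}-updown-{minutes}m-{start_ts + window_sec}")
--
--     # De-dupe preserving order
--     seen = set()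
--     out: List[str] = []
--     for s in candidates:
--         if s not in seen:
--             seen.add(s)
--             out.append(s)
--     return out
-- ===== SOURCE B (Python) =====
-- from typing import List
--
--
-- def _bucket_start(ts: int, window_sec: int) -> int:
--     return (ts // window_sec) * window_sec
--
--
-- def _compute_candidate_slugs(asset: str, now_ts: int, window_sec: int, ahead: int, behind: int) -> List[str]:
--     # Each end-of-window anchor equals the next offset's start anchor, so the
--     # de-duplicated candidates are just the contiguous timestamps for offsets
--     # -behind .. ahead+1 (empty when the original offset range is empty).
--     asset_l = asset.lower()
--     minutes = int(window_sec / 60)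
--     base = _bucket_start(now_ts, window_sec)
--     if ahead < -behind:
--         return []
--     return [f"{asset_l}-updown-{minutes}m-{base + off * window_sec}"
--             for off in range(-behind, ahead + 2)]
-- ===== Notes on version B (the rewrite author's own statement) =====
-- stated objective: simpler
-- what changed: B drops A's two-anchors-per-offset candidate list and ordered-dedup loop: since each end-of-window anchor equals the next offset's start anchor, B emits one slug per offset over the widened range(-behind, ahead+2) in a single pass (guarding the empty-range case).
import Mathlib
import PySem

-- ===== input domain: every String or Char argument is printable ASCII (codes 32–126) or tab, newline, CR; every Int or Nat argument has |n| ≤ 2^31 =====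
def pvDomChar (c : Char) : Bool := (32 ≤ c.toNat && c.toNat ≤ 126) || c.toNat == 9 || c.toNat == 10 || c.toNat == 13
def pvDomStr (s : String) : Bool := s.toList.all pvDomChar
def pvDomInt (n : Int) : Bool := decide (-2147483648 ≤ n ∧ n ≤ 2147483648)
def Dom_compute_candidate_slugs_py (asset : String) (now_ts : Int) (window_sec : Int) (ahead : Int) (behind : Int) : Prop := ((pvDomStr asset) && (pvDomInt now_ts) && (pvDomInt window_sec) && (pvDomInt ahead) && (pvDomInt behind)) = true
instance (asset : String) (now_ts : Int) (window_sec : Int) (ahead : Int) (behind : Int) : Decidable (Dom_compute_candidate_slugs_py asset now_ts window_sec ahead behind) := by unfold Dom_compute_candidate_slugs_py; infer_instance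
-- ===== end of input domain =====

-- B replaces A's two-anchors-per-offset list plus ordered-dedup loop by a single
-- pass over the widened offset range -behind..ahead+1 (simpler decomposition).

-- shared slug formatting (the f-string "{asset_l}-updown-{minutes}m-{ts}")
def pvSlug (asset_l : String) (minutes : Int) (ts : Int) : String :=
  String.ofList (asset_l.toList ++ "-updown-".toList ++ PySem.Int.toChars minutes
    ++ "m-".toList ++ PySem.Int.toChars ts)

-- ===== PORT A =====
-- _bucket_start(ts, window_sec) = (ts // window_sec) * window_sec
def bucket_start_py (ts : Int) (window_sec : Int) : Int :=
  (PySem.Int.floordiv ts window_sec) * window_sec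

def compute_candidate_slugs_py (asset : String) (now_ts : Int) (window_sec : Int) (ahead : Int) (behind : Int) : List String :=
  let asset_l := PySem.Str.lower asset
  let minutes := PySem.Int.truncdiv window_sec 60   -- int(window_sec / 60), exact for |window_sec| < 2^53
  let base := bucket_start_py now_ts window_sec
  let candidates : List String :=
    (PySem.List.pyRange (-behind) (ahead + 1)).foldl
      (fun acc off =>
        let start_ts := base + off * window_sec
        acc ++ [pvSlug asset_l minutes start_ts, pvSlug asset_l minutes (start_ts + window_sec)])
      []
  -- de-dupe preserving order: seen set + out list
  (candidates.foldl
    (fun (st : PySem.Set String × List String) s =>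
      if PySem.Set.contains st.1 s then st else (PySem.Set.add st.1 s, st.2 ++ [s]))
    (PySem.Set.empty, [])).2

-- ===== PORT B =====
def compute_candidate_slugs_py_alt (asset : String) (now_ts : Int) (window_sec : Int) (ahead : Int) (behind : Int) : List String :=
  let asset_l := PySem.Str.lower asset
  let minutes := PySem.Int.truncdiv window_sec 60
  let base := bucket_start_py now_ts window_sec
  if ahead < -behind then []
  else (PySem.List.pyRange (-behind) (ahead + 2)).map
    (fun off => pvSlug asset_l minutes (base + off * window_sec))

-- ===== PRECONDITION & SPEC =====
-- Pre_ excludes only window_sec = 0, where A raises ZeroDivisionError in _bucket_start.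
def Pre_compute_candidate_slugs_py (asset : String) (now_ts : Int) (window_sec : Int) (ahead : Int) (behind : Int) : Prop :=
  window_sec ≠ 0
instance (asset : String) (now_ts : Int) (window_sec : Int) (ahead : Int) (behind : Int) : Decidable (Pre_compute_candidate_slugs_py asset now_ts window_sec ahead behind) := by unfold Pre_compute_candidate_slugs_py; infer_instance

def pvWitness_compute_candidate_slugs_py : String × Int × Int × Int × Int := ("BTC", 1000, 900, 2, 1)

def Spec_compute_candidate_slugs_py (asset : String) (now_ts : Int) (window_sec : Int) (ahead : Int) (behind : Int) (out : List String) : Prop := out = compute_candidate_slugs_py_alt asset now_ts window_sec ahead behind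
instance (asset : String) (now_ts : Int) (window_sec : Int) (ahead : Int) (behind : Int) (out : List String) : Decidable (Spec_compute_candidate_slugs_py asset now_ts window_sec ahead behind out) := by unfold Spec_compute_candidate_slugs_py; infer_instance

-- ===== CLAIM (what is proved, stated in full; the proofs are below) =====
def Claim_equal_compute_candidate_slugs_py : Prop := ∀ (asset : String) (now_ts : Int) (window_sec : Int) (ahead : Int) (behind : Int), Dom_compute_candidate_slugs_py asset now_ts window_sec ahead behind → Pre_compute_candidate_slugs_py asset now_ts window_sec ahead behind → Spec_compute_candidate_slugs_py asset now_ts window_sec ahead behind (compute_candidate_slugs_py asset now_ts window_sec ahead behind)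

-- ===== LEMMAS AND PROOFS =====

-- str(n) is injective
lemma pv_digitChar_inj {a b : Nat} (ha : a < 10) (hb : b < 10)
    (h : Nat.digitChar a = Nat.digitChar b) : a = b := by
  interval_cases a <;> interval_cases b <;> simp_all [Nat.digitChar]

lemma pv_toDigits10_inj : ∀ (m n : Nat), Nat.toDigits 10 m = Nat.toDigits 10 n → m = n := by
  intro m
  induction m using Nat.strong_induction_on with
  | _ m ih =>
    intro n h
    rw [Nat.toDigits_eq_if (by norm_num)] at h
    rw [Nat.toDigits_eq_if (n := n) (by norm_num)] at h
    split_ifs at h with h1 h2 h2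
    · exact pv_digitChar_inj h1 h2 (List.singleton_inj.mp h)
    · exfalso
      have hl := congrArg List.length h
      simp only [List.length_append, List.length_cons, List.length_nil] at hl
      have hp := Nat.length_toDigits_pos (b := 10) (n := n / 10)
      omega
    · exfalso
      have hl := congrArg List.length h
      simp only [List.length_append, List.length_cons, List.length_nil] at hl
      have hp := Nat.length_toDigits_pos (b := 10) (n := m / 10)
      omega
    · rw [← List.concat_eq_append, ← List.concat_eq_append, List.concat_inj] at h
      have hd : m / 10 = n / 10 := ih (m / 10) (by omega) _ h.1
      have hm : m % 10 = n % 10 :=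
        pv_digitChar_inj (Nat.mod_lt _ (by norm_num)) (Nat.mod_lt _ (by norm_num)) h.2
      omega

lemma pv_toChars_inj {m n : Int} (h : PySem.Int.toChars m = PySem.Int.toChars n) : m = n := by
  have hdash : ∀ k : Nat, '-' ∉ Nat.toDigits 10 k := by
    intro k hk
    have := Nat.isDigit_of_mem_toDigits (by norm_num) (by norm_num) hk
    simp [Char.isDigit] at this
  unfold PySem.Int.toChars at h
  split_ifs at h with h1 h2 h2
  · have h2 : Nat.toDigits 10 m.natAbs = Nat.toDigits 10 n.natAbs := by injection h
    have := pv_toDigits10_inj _ _ h2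
    omega
  · exfalso
    have hne := Nat.length_toDigits_pos (b := 10) (n := n.toNat)
    obtain ⟨c, cs, hc⟩ := List.exists_cons_of_ne_nil
      (List.ne_nil_of_length_pos (l := Nat.toDigits 10 n.toNat) hne)
    rw [hc] at h
    exact hdash n.toNat (hc ▸ (List.cons.injEq .. ▸ h).1 ▸ List.mem_cons_self)
  · exfalso
    have hne := Nat.length_toDigits_pos (b := 10) (n := m.toNat)
    obtain ⟨c, cs, hc⟩ := List.exists_cons_of_ne_nil
      (List.ne_nil_of_length_pos (l := Nat.toDigits 10 m.toNat) hne)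
    rw [hc] at h
    exact hdash m.toNat (hc ▸ ((List.cons.injEq .. ▸ h).1).symm ▸ List.mem_cons_self)
  · have := pv_toDigits10_inj _ _ h
    omega

lemma pv_slug_inj {al : String} {m t1 t2 : Int}
    (h : pvSlug al m t1 = pvSlug al m t2) : t1 = t2 := by
  unfold pvSlug at h
  have h' := String.ofList_inj.mp h
  simp only [List.append_assoc, List.append_cancel_left_eq] at h'
  exact pv_toChars_inj h'

-- the dedup loop computes PySem.Set.update (hence Set.ofList from empty)
lemma pv_dedup_loop (cs : List String) :
    ∀ S : PySem.Set String,
      cs.foldl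
        (fun (st : PySem.Set String × List String) s =>
          if PySem.Set.contains st.1 s then st else (PySem.Set.add st.1 s, st.2 ++ [s]))
        (S, S) = (PySem.Set.update S cs, PySem.Set.update S cs) := by
  induction cs with
  | nil => intro S; simp [PySem.Set.update_nil]
  | cons c cs ih =>
    intro S
    rw [PySem.Set.update_cons, List.foldl_cons, ← ih (PySem.Set.add S c)]
    by_cases hc : PySem.Set.contains S c
    · simp only [hc, if_true]
      rw [PySem.Set.add_of_mem ((PySem.Set.contains_iff S c).mp hc)]
    · rw [if_neg hc]
      have hni : c ∉ S := fun hm => hc ((PySem.Set.contains_iff S c).mpr hm)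
      rw [PySem.Set.add_of_not_mem hni]

-- core: dedup of the interleaved anchors is the widened contiguous range
lemma pv_core (F : Int → String) (hF : ∀ {o1 o2 : Int}, F o1 = F o2 → o1 = o2) :
    ∀ (n : Nat) (a : Int),
      PySem.Set.ofList ((PySem.List.pyRange a (a + n)).flatMap (fun o => [F o, F (o + 1)])) =
        if n = 0 then [] else (PySem.List.pyRange a (a + n + 1)).map F := by
  intro n
  induction n with
  | zero =>
    intro a
    rw [if_pos rfl]
    have h0 : a + ((0 : Nat) : Int) = a := by push_cast; ring
    rw [h0, PySem.List.pyRange_one_eq_nil (le_refl a)]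
    rfl
  | succ n ih =>
    intro a
    have hc1 : a + ((n + 1 : Nat) : Int) = (a + n) + 1 := by push_cast; ring
    rw [hc1, PySem.List.pyRange_one_succ_right (by omega), List.flatMap_append,
        PySem.Set.ofList_append]
    simp only [List.flatMap_cons, List.flatMap_nil, List.append_nil]
    rw [ih a]
    by_cases hn : n = 0
    · subst hn
      rw [if_pos rfl, PySem.Set.update_nil_left, if_neg (by omega)]
      have h0 : a + ((0 : Nat) : Int) = a := by push_cast; ring
      rw [h0]
      have hr2 : PySem.List.pyRange a (a + 1 + 1) = [a, a + 1] := by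
        rw [PySem.List.pyRange_one_cons (by omega), PySem.List.pyRange_one_cons (by omega),
            PySem.List.pyRange_one_eq_nil (by omega)]
      rw [hr2]
      have hnd : ([F a, F (a + 1)] : List String).Nodup := by
        refine List.nodup_cons.mpr ⟨?_, List.nodup_singleton _⟩
        intro hmem
        rw [List.mem_singleton] at hmem
        have := hF hmem
        omega
      rw [PySem.Set.ofList_eq_self_of_nodup _ hnd]
      rfl
    · rw [if_neg hn, if_neg (by omega)]
      rw [PySem.Set.update_cons, PySem.Set.update_cons, PySem.Set.update_nil]
      have hmem : F (a + n) ∈ (PySem.List.pyRange a (a + n + 1)).map F :=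
        List.mem_map_of_mem (PySem.List.mem_pyRange_one.mpr ⟨by omega, by omega⟩)
      rw [PySem.Set.add_of_mem hmem]
      have hnot : F (a + n + 1) ∉ (PySem.List.pyRange a (a + n + 1)).map F := by
        intro hm
        obtain ⟨o, ho, heq⟩ := List.mem_map.mp hm
        have h1 := hF heq
        have h2 := PySem.List.mem_pyRange_one.mp ho
        omega
      rw [PySem.Set.add_of_not_mem hnot]
      rw [PySem.List.pyRange_one_succ_right (a := a) (b := a + n + 1) (by omega), List.map_append]
      rfl

-- ===== VERDICT (by name: the statement is the Claim_ definition above) =====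
theorem compute_candidate_slugs_py_spec : Claim_equal_compute_candidate_slugs_py := by
  intro asset now_ts window_sec ahead behind _ hpre
  unfold Spec_compute_candidate_slugs_py
  have main : ∀ (al : String) (minutes base : Int),
      (((PySem.List.pyRange (-behind) (ahead + 1)).foldl
          (fun acc off =>
            acc ++ [pvSlug al minutes (base + off * window_sec),
                    pvSlug al minutes (base + off * window_sec + window_sec)]) []).foldl
        (fun (st : PySem.Set String × List String) s =>
          if PySem.Set.contains st.1 s then st else (PySem.Set.add st.1 s, st.2 ++ [s]))
        (PySem.Set.empty, PySem.Set.empty)).2 =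
      (if ahead < -behind then []
       else (PySem.List.pyRange (-behind) (ahead + 2)).map
         (fun off => pvSlug al minutes (base + off * window_sec))) := by
    intro al minutes base
    set F : Int → String := fun o => pvSlug al minutes (base + o * window_sec) with hFdef
    have hF : ∀ {o1 o2 : Int}, F o1 = F o2 → o1 = o2 := by
      intro o1 o2 h
      have h1 := pv_slug_inj h
      exact mul_right_cancel₀ hpre (by omega)
    have hfun : (fun (off : Int) =>
        [pvSlug al minutes (base + off * window_sec),
         pvSlug al minutes (base + off * window_sec + window_sec)]) =
        fun off => [F off, F (off + 1)] := by
      funext o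
      have h : base + o * window_sec + window_sec = base + (o + 1) * window_sec := by ring
      rw [hFdef]
      simp only [h]
    rw [PySem.List.foldl_append_eq_flatMap]
    rw [List.nil_append, hfun, pv_dedup_loop _ PySem.Set.empty]
    dsimp only
    rw [show (PySem.Set.empty : PySem.Set String) = ([] : List String) from rfl,
        PySem.Set.update_nil_left]
    by_cases hlt : ahead < -behind
    · rw [if_pos hlt, PySem.List.pyRange_one_eq_nil (by omega)]
      rfl
    · rw [if_neg hlt]
      have h1 : ahead + 1 = -behind + (((ahead + 1 + behind).toNat : Nat) : Int) := by omega
      have h2 : ahead + 2 = -behind + (((ahead + 1 + behind).toNat : Nat) : Int) + 1 := by omega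
      rw [h1, h2, pv_core F hF (ahead + 1 + behind).toNat (-behind), if_neg (by omega)]
  exact main (PySem.Str.lower asset) (PySem.Int.truncdiv window_sec 60)
    (bucket_start_py now_ts window_sec)
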